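-- pv_equiv track=rewrite | github.com/naske8787-bit/Capitol_Trades_API | crypto_bot/influencer_monitor.py | _detect_symbol_mentions
-- ===== SOURCE A (Python) =====
-- from typing import Dict, List, Optional
--
-- def _detect_symbol_mentions(text: str, candidates: List[str]) -> List[str]:
--     """Return which candidate symbols are explicitly mentioned in text."""
--     raw = text.lower()
--     mentioned = []
--     _SYMBOL_ALIASES = {
--         "BTC": ["bitcoin", "btc", "xbt"],
--         "ETH": ["ethereum", "eth", "ether"],
--         "SOL": ["solana", "sol"],
--         "DOGE": ["dogecoin", "doge"],
--         "BNB": ["bnb", "binance coin"],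
--         "ADA": ["cardano", "ada"],
--         "XRP": ["xrp", "ripple"],
--         "AVAX": ["avalanche", "avax"],
--         "MATIC": ["polygon", "matic"],
--         "LINK": ["chainlink", "link"],
--     }
--     for sym in candidates:
--         aliases = _SYMBOL_ALIASES.get(sym, [sym.lower()])
--         if any(alias in raw for alias in aliases):
--             mentioned.append(sym)
--     # If none explicitly mentioned, assume all affected symbols
--     return mentioned or candidates
-- ===== SOURCE B (Python) =====
-- _SYMBOL_ALIASES = {
--     "BTC": ["bitcoin", "btc", "xbt"],
--     "ETH": ["ethereum", "eth", "ether"],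
--     "SOL": ["solana", "sol"],
--     "DOGE": ["dogecoin", "doge"],
--     "BNB": ["bnb", "binance coin"],
--     "ADA": ["cardano", "ada"],
--     "XRP": ["xrp", "ripple"],
--     "AVAX": ["avalanche", "avax"],
--     "MATIC": ["polygon", "matic"],
--     "LINK": ["chainlink", "link"],
-- }
--
-- def _detect_symbol_mentions(text, candidates):
--     """Return which candidate symbols are explicitly mentioned in text."""
--     raw = text.lower()
--     # every pattern to search for: all table aliases, plus the lowered name of any unknown candidate
--     patterns = [a for als in _SYMBOL_ALIASES.values() for a in als]
--     patterns += [s.lower() for s in candidates if s not in _SYMBOL_ALIASES]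
--     pats = set(patterns)
--     lengths = list(dict.fromkeys(len(p) for p in patterns))
--     # length-grouped sliding window: for each pattern length, slide over the text once
--     # and collect every window that is a pattern
--     found = set()
--     for L in lengths:
--         for i in range(len(raw) - L + 1):
--             w = raw[i:i + L]
--             if w in pats:
--                 found.add(w)
--     mentioned = [s for s in candidates
--                  if any(a in found for a in _SYMBOL_ALIASES.get(s, [s.lower()]))]
--     return mentioned or candidates
-- ===== Notes on version B (the rewrite author's own statement) =====
-- stated objective: faster
-- what changed: A runs a substring search per candidate alias ('alias in raw'); B collects all patterns (table aliases plus lowered unknown candidates) into a hash set, then does a length-grouped sliding-window scan of the text - for each distinct pattern length it slides a window once over the text and set-checks each window - and finally filters candidates by membership of an alias in the found-set.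
import Mathlib
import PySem

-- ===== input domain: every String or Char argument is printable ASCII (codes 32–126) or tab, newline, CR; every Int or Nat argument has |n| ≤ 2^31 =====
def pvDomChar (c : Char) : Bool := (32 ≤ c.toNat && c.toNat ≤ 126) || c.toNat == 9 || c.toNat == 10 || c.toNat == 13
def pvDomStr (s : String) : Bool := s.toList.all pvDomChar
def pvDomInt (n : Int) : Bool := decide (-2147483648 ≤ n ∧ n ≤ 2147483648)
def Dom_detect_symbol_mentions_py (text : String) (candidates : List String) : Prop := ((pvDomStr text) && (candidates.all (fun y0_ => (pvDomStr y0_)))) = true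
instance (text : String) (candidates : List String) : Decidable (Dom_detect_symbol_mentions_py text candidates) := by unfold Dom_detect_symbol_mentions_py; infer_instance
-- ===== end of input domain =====

-- B replaces A's per-candidate substring searches by a length-grouped sliding-window
-- scan: all patterns (table aliases + lowered unknown candidates) go into a set, one
-- window pass per distinct pattern length marks the patterns occurring in the text,
-- and candidates are filtered by that found-set (measured faster; same value).


-- ===== PORT A =====
-- the _SYMBOL_ALIASES dict literal (shared table of both programs)
def pvSymbolAliases : PySem.Dict String (List String) := PySem.Dict.ofList
  [("BTC", ["bitcoin", "btc", "xbt"]),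
   ("ETH", ["ethereum", "eth", "ether"]),
   ("SOL", ["solana", "sol"]),
   ("DOGE", ["dogecoin", "doge"]),
   ("BNB", ["bnb", "binance coin"]),
   ("ADA", ["cardano", "ada"]),
   ("XRP", ["xrp", "ripple"]),
   ("AVAX", ["avalanche", "avax"]),
   ("MATIC", ["polygon", "matic"]),
   ("LINK", ["chainlink", "link"])]

def detect_symbol_mentions_py (text : String) (candidates : List String) : List String :=
  let raw := PySem.Str.lower text
  let mentioned := candidates.foldl (fun acc sym =>
    let aliases := pvSymbolAliases.getD sym [PySem.Str.lower sym]
    if aliases.any (fun a_ => PySem.Str.isIn a_ raw) then acc ++ [sym] else acc) []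
  if mentioned = [] then candidates else mentioned

-- ===== PORT B =====
-- [a for als in _SYMBOL_ALIASES.values() for a in als]  (the table is a fixed literal)
def pvBasePatterns : List String :=
  ["bitcoin", "btc", "xbt", "ethereum", "eth", "ether", "solana", "sol",
   "dogecoin", "doge", "bnb", "binance coin", "cardano", "ada", "xrp", "ripple",
   "avalanche", "avax", "polygon", "matic", "chainlink", "link"]

-- patterns = base aliases + [s.lower() for s in candidates if s not in _SYMBOL_ALIASES]
def pvPatterns (candidates : List String) : List String :=
  pvBasePatterns ++ (candidates.filter (fun s => !(pvSymbolAliases.contains s))).map PySem.Str.lower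

-- body of the sliding-window loop: w = raw[i:i+L]; if w in pats: found.add(w)
def pvStep (raw : String) (pats : PySem.Set String) (L : Int)
    (acc : PySem.Set String) (i : Int) : PySem.Set String :=
  let w := PySem.Str.slice raw (some i) (some (i + L))
  if PySem.Set.contains pats w then PySem.Set.add acc w else acc

-- length-grouped sliding-window search: for each distinct pattern length, slide over the text
def pvScan (raw : String) (patterns : List String) : PySem.Set String :=
  let pats := PySem.Set.ofList patterns
  let lengths := PySem.List.dedup (patterns.map PySem.Str.len)
  lengths.foldl (fun fnd L =>
    (PySem.List.pyRange 0 (PySem.Str.len raw - L + 1) 1).foldl (pvStep raw pats L) fnd)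
    PySem.Set.empty

def detect_symbol_mentions_py_alt (text : String) (candidates : List String) : List String :=
  let raw := PySem.Str.lower text
  let found := pvScan raw (pvPatterns candidates)
  let mentioned := candidates.filter (fun s =>
    (pvSymbolAliases.getD s [PySem.Str.lower s]).any (fun a => PySem.Set.contains found a))
  if mentioned = [] then candidates else mentioned

-- ===== PRECONDITION & SPEC =====
def Spec_detect_symbol_mentions_py (text : String) (candidates : List String) (out : List String) : Prop := out = detect_symbol_mentions_py_alt text candidates
instance (text : String) (candidates : List String) (out : List String) : Decidable (Spec_detect_symbol_mentions_py text candidates out) := by unfold Spec_detect_symbol_mentions_py; infer_instance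

-- ===== CLAIM =====
def Claim_equal_detect_symbol_mentions_py : Prop := ∀ (text : String) (candidates : List String), Dom_detect_symbol_mentions_py text candidates → Spec_detect_symbol_mentions_py text candidates (detect_symbol_mentions_py text candidates)

-- ===== LEMMAS AND PROOFS =====

-- membership after one slide of the window at a fixed length
theorem pv_mem_inner (raw : String) (pats : PySem.Set String) (L : Int) (P : List Int)
    (s : PySem.Set String) (w : String) :
    w ∈ P.foldl (pvStep raw pats L) s
      ↔ w ∈ s ∨ ∃ i ∈ P, PySem.Str.slice raw (some i) (some (i + L)) = w
          ∧ PySem.Set.contains pats w = true := by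
  induction P generalizing s with
  | nil => simp
  | cons hd tl ih =>
    simp only [List.foldl_cons, ih, List.mem_cons]
    have hstep : w ∈ pvStep raw pats L s hd
        ↔ w ∈ s ∨ (PySem.Str.slice raw (some hd) (some (hd + L)) = w
            ∧ PySem.Set.contains pats w = true) := by
      unfold pvStep
      by_cases hc : PySem.Set.contains pats (PySem.Str.slice raw (some hd) (some (hd + L))) = true
      · simp only [hc, if_true, PySem.Set.mem_add]
        constructor
        · rintro (h | rfl)
          · exact Or.inl h
          · exact Or.inr ⟨rfl, hc⟩
        · rintro (h | ⟨rfl, _⟩)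
          · exact Or.inl h
          · exact Or.inr rfl
      · simp only [Bool.not_eq_true] at hc
        simp only [hc, Bool.false_eq_true, if_false]
        constructor
        · exact Or.inl
        · rintro (h | ⟨rfl, hc'⟩)
          · exact h
          · rw [hc] at hc'
            simp at hc'
    rw [hstep]
    constructor
    · rintro ((h | ⟨h1, h2⟩) | ⟨i, hi, h1, h2⟩)
      · exact Or.inl h
      · exact Or.inr ⟨hd, Or.inl rfl, h1, h2⟩
      · exact Or.inr ⟨i, Or.inr hi, h1, h2⟩
    · rintro (h | ⟨i, (rfl | hi), h1, h2⟩)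
      · exact Or.inl (Or.inl h)
      · exact Or.inl (Or.inr ⟨h1, h2⟩)
      · exact Or.inr ⟨i, hi, h1, h2⟩

-- membership after sliding at every length in the list
theorem pv_mem_scan_aux (raw : String) (pats : PySem.Set String) (lengths : List Int)
    (s : PySem.Set String) (w : String) :
    w ∈ lengths.foldl (fun fnd L =>
        (PySem.List.pyRange 0 (PySem.Str.len raw - L + 1) 1).foldl (pvStep raw pats L) fnd) s
      ↔ w ∈ s ∨ ∃ L ∈ lengths, ∃ i ∈ PySem.List.pyRange 0 (PySem.Str.len raw - L + 1) 1,
          PySem.Str.slice raw (some i) (some (i + L)) = w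
            ∧ PySem.Set.contains pats w = true := by
  induction lengths generalizing s with
  | nil => simp
  | cons hd tl ih =>
    simp only [List.foldl_cons, ih, pv_mem_inner, List.mem_cons]
    constructor
    · rintro ((h | ⟨i, hi, h1, h2⟩) | ⟨L, hL, i, hi, h1, h2⟩)
      · exact Or.inl h
      · exact Or.inr ⟨hd, Or.inl rfl, i, hi, h1, h2⟩
      · exact Or.inr ⟨L, Or.inr hL, i, hi, h1, h2⟩
    · rintro (h | ⟨L, (rfl | hL), i, hi, h1, h2⟩)
      · exact Or.inl (Or.inl h)
      · exact Or.inl (Or.inr ⟨i, hi, h1, h2⟩)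
      · exact Or.inr ⟨L, hL, i, hi, h1, h2⟩

-- a pattern is some window of the text at one of the collected lengths  ⟺  it occurs in the text
theorem pv_window_iff (raw : String) (patterns : List String) (w : String) (hw : w ∈ patterns) :
    (∃ L ∈ PySem.List.dedup (patterns.map PySem.Str.len),
        ∃ i ∈ PySem.List.pyRange 0 (PySem.Str.len raw - L + 1) 1,
          PySem.Str.slice raw (some i) (some (i + L)) = w)
      ↔ PySem.Str.isIn w raw = true := by
  rw [show PySem.Str.isIn w raw = PySem.Chars.isIn w.toList raw.toList from by
        simp [PySem.Str.isIn]]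
  rw [← PySem.Chars.exists_prefix_drop_iff_isIn]
  constructor
  · rintro ⟨L, hL, i, hi, hsl⟩
    rw [PySem.List.mem_dedup] at hL
    obtain ⟨p, _, rfl⟩ := List.mem_map.mp hL
    rw [PySem.List.mem_pyRange_one] at hi
    have hL0 : (0 : Int) ≤ PySem.Str.len p := by rw [PySem.Str.len_eq]; omega
    obtain ⟨j, rfl⟩ : ∃ j : Nat, i = (j : Int) := ⟨i.toNat, by omega⟩
    obtain ⟨n, hn⟩ : ∃ n : Nat, PySem.Str.len p = (n : Int) :=
      ⟨(PySem.Str.len p).toNat, by omega⟩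
    rw [hn] at hsl
    refine ⟨j, ?_⟩
    have htl := congrArg String.toList hsl
    rw [PySem.Str.toList_slice,
      show PySem.Chars.slice raw.toList (some (j : Int)) (some ((j : Int) + (n : Int)))
          = PySem.List.slice raw.toList (some (j : Int)) (some ((j : Int) + (n : Int))) from rfl,
      PySem.List.slice_natCast_add] at htl
    rw [← htl]
    exact (List.take_prefix _ _)
  · rintro ⟨j, hj⟩
    obtain ⟨u, v, huv⟩ := (PySem.Chars.isIn_iff_infix w.toList raw.toList).mp
      (by rw [← PySem.Chars.exists_prefix_drop_iff_isIn]; exact ⟨j, hj⟩)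
    refine ⟨PySem.Str.len w, (PySem.List.mem_dedup _ _).mpr (List.mem_map.mpr ⟨w, hw, rfl⟩),
      (u.length : Int), ?_, ?_⟩
    · rw [PySem.List.mem_pyRange_one, PySem.Str.len_eq, PySem.Str.len_eq, ← huv]
      simp only [List.length_append]
      push_cast
      omega
    · apply String.toList_inj.mp
      rw [PySem.Str.len_eq, PySem.Str.toList_slice]
      rw [show ((u.length : Int) + (w.toList.length : Int))
            = (((u.length + w.toList.length : Nat)) : Int) from by push_cast; ring]
      rw [show PySem.Chars.slice raw.toList (some (u.length : Int))
              (some (((u.length + w.toList.length : Nat)) : Int))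
            = PySem.List.slice raw.toList (some (u.length : Int))
              (some ((u.length : Int) + (w.toList.length : Int))) from by push_cast; rfl,
          PySem.List.slice_natCast_add, ← huv, List.append_assoc, List.drop_left,
          List.take_left]

-- characterisation of the scan's found-set
theorem pv_mem_scan (raw : String) (patterns : List String) (w : String) :
    w ∈ pvScan raw patterns ↔ w ∈ patterns ∧ PySem.Str.isIn w raw = true := by
  unfold pvScan
  rw [pv_mem_scan_aux]
  simp only [PySem.Set.empty, List.not_mem_nil, false_or]
  constructor
  · rintro ⟨L, hL, i, hi, h1, h2⟩
    have hw : w ∈ patterns := (PySem.Set.mem_ofList _ _).mp ((PySem.Set.contains_iff _ _).mp h2)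
    exact ⟨hw, (pv_window_iff raw patterns w hw).mp ⟨L, hL, i, hi, h1⟩⟩
  · rintro ⟨hw, hin⟩
    obtain ⟨L, hL, i, hi, hsl⟩ := (pv_window_iff raw patterns w hw).mpr hin
    exact ⟨L, hL, i, hi, hsl,
      (PySem.Set.contains_iff _ _).mpr ((PySem.Set.mem_ofList _ _).mpr hw)⟩

-- every alias A tests for a candidate is among B's patterns
theorem pv_alias_mem (candidates : List String) (sym : String) (hsym : sym ∈ candidates)
    (a : String) (ha : a ∈ pvSymbolAliases.getD sym [PySem.Str.lower sym]) :
    a ∈ pvPatterns candidates := by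
  unfold pvPatterns
  by_cases hc : pvSymbolAliases.contains sym = true
  · have hk : sym ∈ pvSymbolAliases.keys := (PySem.Dict.contains_iff_mem_keys _ _).mp hc
    have hk' : sym ∈ ["BTC", "ETH", "SOL", "DOGE", "BNB", "ADA", "XRP", "AVAX", "MATIC", "LINK"] := by
      rw [show pvSymbolAliases.keys = ["BTC", "ETH", "SOL", "DOGE", "BNB", "ADA", "XRP", "AVAX", "MATIC", "LINK"] from by decide] at hk
      exact hk
    simp only [List.mem_cons, List.not_mem_nil, or_false] at hk'
    rcases hk' with rfl | rfl | rfl | rfl | rfl | rfl | rfl | rfl | rfl | rfl <;>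
      exact List.mem_append_left _ (List.Sublist.mem ha (by decide))
  · simp only [Bool.not_eq_true] at hc
    rw [PySem.Dict.getD_of_not_contains _ _ hc] at ha
    simp only [List.mem_cons, List.not_mem_nil, or_false] at ha
    subst ha
    exact List.mem_append_right _
      (List.mem_map.mpr ⟨sym, List.mem_filter.mpr ⟨hsym, by simp [hc]⟩, rfl⟩)

-- A's per-candidate test equals B's found-set test
theorem pv_test_eq (text : String) (candidates : List String) (sym : String)
    (hsym : sym ∈ candidates) :
    ((pvSymbolAliases.getD sym [PySem.Str.lower sym]).any
        (fun a_ => PySem.Str.isIn a_ (PySem.Str.lower text)))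
      = ((pvSymbolAliases.getD sym [PySem.Str.lower sym]).any
        (fun a => PySem.Set.contains (pvScan (PySem.Str.lower text) (pvPatterns candidates)) a)) := by
  rw [Bool.eq_iff_iff]
  simp only [List.any_eq_true]
  constructor
  · rintro ⟨a, ha, hin⟩
    refine ⟨a, ha, ?_⟩
    rw [PySem.Set.contains_iff, pv_mem_scan]
    exact ⟨pv_alias_mem candidates sym hsym a ha, hin⟩
  · rintro ⟨a, ha, hin⟩
    rw [PySem.Set.contains_iff, pv_mem_scan] at hin
    exact ⟨a, ha, hin.2⟩

-- ===== VERDICT =====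
theorem detect_symbol_mentions_py_spec : Claim_equal_detect_symbol_mentions_py := by
  intro text candidates _
  unfold Spec_detect_symbol_mentions_py detect_symbol_mentions_py detect_symbol_mentions_py_alt
  dsimp only
  simp only [PySem.List.foldl_append_if_eq_filter, List.nil_append]
  rw [List.filter_congr (fun sym hs => pv_test_eq text candidates sym hs)]
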